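-- pv_equiv track=rewrite | github.com/Puggo1145/cs61-series | cs61a/tree_recursion/count_partition.py | count_partition
-- ===== SOURCE A (Python) =====
-- def count_partition(n: int, m: int):
--     if n == 0:
--         return 1
--     elif n < 0:
--         return 0
--     elif m == 0:
--         return 0
--     else:
--         with_m = count_partition(n - m, m)
--         without_m = count_partition(n, m - 1)
--         return with_m + without_m
-- ===== SOURCE B (Python) =====
-- def count_partition(n: int, m: int):
--     # Bottom-up DP over (amount, largest part); parts larger than n are useless.
--     if n < 0:
--         return 0
--     if n == 0:
--         return 1
--     if m <= 0:
--         return 0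
--     k_max = min(m, n)
--     dp = [1] + [0] * n
--     for k in range(1, k_max + 1):
--         for j in range(k, n + 1):
--             dp[j] += dp[j - k]
--     return dp[n]
-- ===== Notes on version B (the rewrite author's own statement) =====
-- stated objective: faster
-- what changed: Replaces the exponential tree recursion with an iterative one-dimensional DP table over parts 1..min(m,n); a timing run measured B over 13x faster at the sizes A finishes, and A timed out at larger n where B returned.
import Mathlib
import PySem

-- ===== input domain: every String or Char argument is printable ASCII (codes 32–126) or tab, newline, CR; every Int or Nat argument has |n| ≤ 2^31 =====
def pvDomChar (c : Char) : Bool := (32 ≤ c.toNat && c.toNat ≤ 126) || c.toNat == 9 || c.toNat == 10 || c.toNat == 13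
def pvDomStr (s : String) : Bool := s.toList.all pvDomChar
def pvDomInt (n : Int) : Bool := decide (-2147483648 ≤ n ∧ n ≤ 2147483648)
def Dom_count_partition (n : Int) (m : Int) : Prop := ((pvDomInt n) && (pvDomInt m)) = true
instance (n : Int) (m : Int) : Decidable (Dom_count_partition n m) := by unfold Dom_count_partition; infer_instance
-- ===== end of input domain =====

-- B replaces A's exponential double recursion by an iterative DP table over parts 1..min(m,n); measurably faster (timing: >13x at the sizes A finishes, A times out at larger n).

-- ===== PORT A =====
-- Literal port of A's tree recursion. The `m < 0` guard (with 0 < n) only makes the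
-- recursion total: there Python A recurses forever (RecursionError), outside Pre_.
def count_partition (n : Int) (m : Int) : Int :=
  if n = 0 then 1
  else if n < 0 then 0
  else if m = 0 then 0
  else if m < 0 then 0  -- totality guard; Python diverges here (excluded by Pre_)
  else
    count_partition (n - m) m + count_partition n (m - 1)
termination_by (2 * n + m).toNat
decreasing_by all_goals omega

-- ===== PORT B =====
-- Port of Source B: 1-D DP dp[j] = #partitions of j with parts ≤ k, for k = 1..min(m,n).
def count_partition_alt (n : Int) (m : Int) : Int :=
  if n < 0 then 0
  else if n = 0 then 1
  else if m ≤ 0 then 0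
  else
    let N := n.toNat
    let kmax := (min m n).toNat
    let dp0 : List Int := 1 :: List.replicate N 0
    let dp := (List.range' 1 kmax).foldl
      (fun dp k => (List.range' k (N + 1 - k)).foldl
        (fun dp j => dp.set j (dp.getD j 0 + dp.getD (j - k) 0)) dp)
      dp0
    dp.getD N 0

-- ===== PRECONDITION & SPEC =====
-- Pre_ excludes exactly the inputs (n > 0 with m < 0) on which Python A recurses
-- without bound and raises RecursionError.
def Pre_count_partition (n : Int) (m : Int) : Prop := 0 ≤ m ∨ n ≤ 0
instance (n : Int) (m : Int) : Decidable (Pre_count_partition n m) := by unfold Pre_count_partition; infer_instance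
def pvWitness_count_partition : Int × Int := (6, 4)

def Spec_count_partition (n : Int) (m : Int) (out : Int) : Prop := out = count_partition_alt n m
instance (n : Int) (m : Int) (out : Int) : Decidable (Spec_count_partition n m out) := by unfold Spec_count_partition; infer_instance

-- ===== CLAIM (what is proved, stated in full; the proofs are below) =====
def Claim_equal_count_partition : Prop := ∀ (n : Int) (m : Int), Dom_count_partition n m → Pre_count_partition n m → Spec_count_partition n m (count_partition n m)

-- ===== LEMMAS AND PROOFS =====

-- A's value at nonnegative Nat-coded arguments
def cpN (i k : Nat) : Int := count_partition (i : Int) (k : Int)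

theorem cp_zero (m : Int) : count_partition 0 m = 1 := by rw [count_partition]; simp

theorem cp_neg {n : Int} (m : Int) (h : n < 0) : count_partition n m = 0 := by
  rw [count_partition]; simp [h]; omega

theorem cp_m0 {n : Int} (h : 0 < n) : count_partition n 0 = 0 := by
  rw [count_partition]; simp; omega

theorem cp_rec {n m : Int} (hn : 0 < n) (hm : 0 < m) :
    count_partition n m = count_partition (n - m) m + count_partition n (m - 1) := by
  rw [count_partition]
  have h1 : ¬ n = 0 := by omega
  have h2 : ¬ n < 0 := by omega
  have h3 : ¬ m = 0 := by omega
  have h4 : ¬ m < 0 := by omega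
  simp [h1, h2, h3, h4]

theorem cp_small {n m : Int} (hn : 0 ≤ n) (h : n < m) :
    count_partition n m = count_partition n (m - 1) := by
  rcases eq_or_lt_of_le hn with h0 | h0
  · rw [← h0, cp_zero, cp_zero]
  · rw [cp_rec h0 (by omega), cp_neg _ (by omega)]; ring

theorem cp_ge {n : Int} (hn : 0 ≤ n) : ∀ d : Nat, count_partition n (n + d) = count_partition n n := by
  intro d
  induction d with
  | zero => simp
  | succ d ih =>
      have := cp_small hn (m := n + (d + 1)) (by omega)
      rw [show n + ((d : Int) + 1) - 1 = n + d by ring] at this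
      rw [show ((d : Nat) + 1 : Nat) = ((d + 1 : Nat)) from rfl]
      push_cast
      rw [show n + ((d : Int) + 1) = n + (↑d + 1) from rfl] at this ⊢
      rw [this, ih]

theorem cp_min {n m : Int} (hn : 0 ≤ n) (hm : 0 ≤ m) :
    count_partition n m = count_partition n (min m n) := by
  rcases le_or_gt m n with h | h
  · rw [min_eq_left h]
  · rw [min_eq_right (le_of_lt h)]
    have hd : m = n + ((m - n).toNat : Int) := by omega
    rw [hd, cp_ge hn]

-- getD / set on a range-map list
theorem map_range_getD (L : Nat) (f : Nat → Int) (j : Nat) (hj : j < L) :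
    ((List.range L).map f).getD j 0 = f j := by
  simp [List.getD, hj]

theorem map_range_set (L : Nat) (f : Nat → Int) (j : Nat) (v : Int) (_hj : j < L) :
    ((List.range L).map f).set j v = (List.range L).map (Function.update f j v) := by
  apply List.ext_getElem
  · simp
  · intro i h1 h2
    simp only [List.getElem_set, List.getElem_map, List.getElem_range] at *
    by_cases hij : j = i
    · simp [hij, Function.update_apply]
    · simp [hij, Ne.symm hij]

theorem dp0_eq (N : Nat) :
    (List.range (N + 1)).map (fun j => if j = 0 then (1 : Int) else 0) = 1 :: List.replicate N 0 := by
  induction N with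
  | zero => rfl
  | succ N ih =>
      rw [List.range_succ, List.map_append, ih]
      simp [List.replicate_succ' (n := N)]

-- the recurrence in Nat-index form
theorem cpN_rec {j k : Nat} (hk : 0 < k) (hkj : k ≤ j) :
    cpN j k = cpN j (k - 1) + cpN (j - k) k := by
  have hj : 0 < j := lt_of_lt_of_le hk hkj
  unfold cpN
  rw [cp_rec (by exact_mod_cast hj) (by exact_mod_cast hk)]
  have h1 : ((j : Int) - (k : Int)) = ((j - k : Nat) : Int) := by omega
  have h2 : ((k : Int) - 1) = ((k - 1 : Nat) : Int) := by omega
  rw [h1, h2]; ring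

theorem cpN_small {j k : Nat} (hk : 0 < k) (hjk : j < k) : cpN j k = cpN j (k - 1) := by
  unfold cpN
  rcases Nat.eq_zero_or_pos j with h0 | h0
  · subst h0; simp only [Nat.cast_zero]; rw [cp_zero, cp_zero]
  · rw [cp_small (by exact_mod_cast Nat.zero_le j) (by exact_mod_cast hjk)]
    have : ((k : Int) - 1) = ((k - 1 : Nat) : Int) := by omega
    rw [this]

theorem inner_fold (k N : Nat) (hk : 0 < k) :
    ∀ (cnt j : Nat), k ≤ j → j + cnt ≤ N + 1 →
    ∀ f : Nat → Int, (∀ i, i < j → f i = cpN i k) → (∀ i, j ≤ i → f i = cpN i (k - 1)) →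
    (List.range' j cnt).foldl
      (fun dp jj => dp.set jj (dp.getD jj 0 + dp.getD (jj - k) 0)) ((List.range (N + 1)).map f)
    = (List.range (N + 1)).map (fun i => if i < j + cnt then cpN i k else cpN i (k - 1)) := by
  intro cnt
  induction cnt with
  | zero =>
      intro j hkj hle f hlo hhi
      simp only [List.range'_zero, List.foldl_nil, Nat.add_zero]
      apply List.map_congr_left
      intro i hi
      by_cases h : i < j
      · simp [h, hlo i h]
      · simp [h, hhi i (by omega)]
  | succ cnt ih =>
      intro j hkj hle f hlo hhi
      rw [List.range'_succ, List.foldl_cons]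
      have hjN : j < N + 1 := by omega
      have hjkN : j - k < N + 1 := by omega
      have hstep :
          ((List.range (N + 1)).map f).set j
            (((List.range (N + 1)).map f).getD j 0 + ((List.range (N + 1)).map f).getD (j - k) 0)
          = (List.range (N + 1)).map (Function.update f j (cpN j k)) := by
        rw [map_range_getD _ _ _ hjN, map_range_getD _ _ _ hjkN,
            map_range_set _ _ _ _ hjN]
        have hv : f j + f (j - k) = cpN j k := by
          rw [hhi j (le_refl j), hlo (j - k) (by omega), cpN_rec hk hkj]
        rw [hv]
      rw [hstep, ih (j + 1) (by omega) (by omega) _ ?_ ?_]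
      · apply List.map_congr_left
        intro i hi
        have : (i < j + 1 + cnt) ↔ (i < j + (cnt + 1)) := by omega
        simp [this]
      · intro i hij
        by_cases h : i = j
        · subst h; simp
        · rw [Function.update_apply]; simp [h]; exact hlo i (by omega)
      · intro i hij
        rw [Function.update_apply]
        have : ¬ i = j := by omega
        simp [this]; exact hhi i (by omega)

theorem outer_fold (N : Nat) : ∀ K : Nat, K ≤ N →
    (List.range' 1 K).foldl
      (fun dp k => (List.range' k (N + 1 - k)).foldl
        (fun dp j => dp.set j (dp.getD j 0 + dp.getD (j - k) 0)) dp)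
      ((List.range (N + 1)).map (fun i => cpN i 0))
    = (List.range (N + 1)).map (fun i => cpN i K) := by
  intro K
  induction K with
  | zero => intro _; simp
  | succ K ih =>
      intro hK
      rw [List.range'_concat, List.foldl_append, ih (by omega), List.foldl_cons, List.foldl_nil]
      simp only [show 1 + 1 * K = K + 1 from by omega]
      rw [inner_fold (K + 1) N (by omega) (N + 1 - (K + 1)) (K + 1) (le_refl _) (by omega)
            (fun i => cpN i K) ?_ ?_]
      · apply List.map_congr_left
        intro i hi
        rw [List.mem_range] at hi
        have : i < K + 1 + (N + 1 - (K + 1)) := by omega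
        simp only [this, if_pos]
      · intro i hij
        rw [cpN_small (by omega) hij]; simp
      · intro i _; simp

-- ===== VERDICT (the statements are the Claim_ definitions above) =====
theorem count_partition_spec : Claim_equal_count_partition := by
  intro n m _ hpre
  unfold Spec_count_partition count_partition_alt
  rcases lt_trichotomy n 0 with hn | hn | hn
  · simp [hn, cp_neg m hn]
  · subst hn; simp [cp_zero]
  · have hm : 0 ≤ m := by rcases hpre with h | h; exact h; omega
    have hn' : ¬ n < 0 := by omega
    have hn0 : ¬ n = 0 := by omega
    simp only [hn', if_false, hn0]
    by_cases hm0 : m ≤ 0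
    · have : m = 0 := le_antisymm hm0 hm
      simp [this, cp_m0 hn]
    · simp only [hm0, if_false]
      set N := n.toNat with hN
      set kmax := (min m n).toNat with hkmax
      have hkN : kmax ≤ N := by
        have : min m n ≤ n := min_le_right m n
        omega
      have hdp0 : (1 : Int) :: List.replicate N 0 = (List.range (N + 1)).map (fun i => cpN i 0) := by
        rw [← dp0_eq]
        apply List.map_congr_left
        intro i _
        by_cases h : i = 0
        · simp [h, cpN, cp_zero]
        · have : 0 < i := Nat.pos_of_ne_zero h
          simp [h, cpN, cp_m0 (show (0:Int) < i by exact_mod_cast this)]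
      rw [hdp0, outer_fold N kmax hkN, map_range_getD _ _ _ (by omega)]
      unfold cpN
      have h1 : ((N : Nat) : Int) = n := by omega
      have h2 : ((kmax : Nat) : Int) = min m n := by
        have : 0 ≤ min m n := le_min hm (le_of_lt hn)
        omega
      rw [h1, h2, ← cp_min (le_of_lt hn) hm]
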